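-- pv_equiv track=rewrite | github.com/srikrishnakaashyap/Coding_Practice | CodeSignalRectangle.py | rectangleOptimized
-- ===== SOURCE A (Python) =====
-- def rectangleOptimized(operations):
--
--     ret = []
--
--     rows = []
--
--     cols = []
--
--     n = len(operations)
--
--     for i, j in enumerate(operations):
--
--         if j[0] == 0:
--             rows.append(j[1])
--             cols.append(j[2])
--
--             rows = sorted(rows)
--             cols = sorted(cols)
--
--         else:
--             if len(rows) == 0:
--                 ret.append(True)
--                 break
--
--             localAns = True
--             for k in range(len(rows)):
--                 if (j[1] <= rows[k] and j[2] <= cols[k]) or (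
--                     j[1] <= cols[k] and j[2] <= rows[k]
--                 ):
--                     continue
--                 else:
--                     localAns = False
--
--             ret.append(localAns)
--
--     return ret
-- ===== SOURCE B (Python) =====
-- def rectangleOptimized(operations):
--     ret = []
--     mins = None  # (min of all stored first dims, min of all stored second dims)
--     for op in operations:
--         if op[0] == 0:
--             if mins is None:
--                 mins = (op[1], op[2])
--             else:
--                 mins = (min(mins[0], op[1]), min(mins[1], op[2]))
--         else:
--             if mins is None:
--                 ret.append(True)
--                 break
--             lo, hi = (op[1], op[2]) if op[1] <= op[2] else (op[2], op[1])
--             ret.append(lo <= min(mins) and hi <= max(mins))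
--     return ret
-- ===== Notes on version B (the rewrite author's own statement) =====
-- stated objective: alternative
-- what changed: Replaces A's re-sorting of both dimension lists at every store and its scan over all stored rectangles at every query by a single running pair of column-wise minima, answering each query with two comparisons.
-- outside the precondition, e.g. on rectangleOptimized([[0, 1, 1], [2, 2]]): A returns [False], B raises IndexError
import Mathlib
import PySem

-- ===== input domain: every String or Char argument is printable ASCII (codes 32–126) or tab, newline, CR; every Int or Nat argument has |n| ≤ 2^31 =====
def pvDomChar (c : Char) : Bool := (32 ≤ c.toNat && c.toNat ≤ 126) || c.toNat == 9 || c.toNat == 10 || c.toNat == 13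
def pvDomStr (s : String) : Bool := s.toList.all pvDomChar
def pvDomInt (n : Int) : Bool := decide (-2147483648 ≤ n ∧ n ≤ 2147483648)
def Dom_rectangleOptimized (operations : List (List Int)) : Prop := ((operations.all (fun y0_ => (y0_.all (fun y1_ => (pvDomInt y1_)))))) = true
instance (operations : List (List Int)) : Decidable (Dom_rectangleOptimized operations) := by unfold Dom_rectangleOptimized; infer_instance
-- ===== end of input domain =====

-- B replaces A's re-sorting of both dimension lists at every store and its scan over all
-- stored rectangles at every query by a running pair of column-wise minima (O(1) per operation).

-- ===== PORT A =====
-- inner loop of A's query branch: for k in range(len(rows)): …  (k is always in range, so getD 0 is never used)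
def rectQueryA (j1 j2 : Int) (rows cols : List Int) : Bool :=
  (PySem.List.pyRange 0 rows.length 1).foldl
    (fun localAns k =>
      if (j1 ≤ (PySem.List.pyGet? rows k).getD 0 ∧ j2 ≤ (PySem.List.pyGet? cols k).getD 0)
          ∨ (j1 ≤ (PySem.List.pyGet? cols k).getD 0 ∧ j2 ≤ (PySem.List.pyGet? rows k).getD 0)
      then localAns else false)
    true

-- A's main loop; ret/rows/cols are the Python variables (sublists have length ≥ 3 under Pre_, so getD 0 is never used)
def rectLoopA : List (List Int) → List Int → List Int → List Bool → List Bool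
  | [], _, _, ret => ret
  | j :: rest, rows, cols, ret =>
    if (PySem.List.pyGet? j 0).getD 0 = 0 then
      rectLoopA rest
        (PySem.List.sorted (rows ++ [(PySem.List.pyGet? j 1).getD 0]) (fun x => x) false)
        (PySem.List.sorted (cols ++ [(PySem.List.pyGet? j 2).getD 0]) (fun x => x) false)
        ret
    else
      if rows.length = 0 then ret ++ [true]   -- append True and break
      else rectLoopA rest rows cols
        (ret ++ [rectQueryA ((PySem.List.pyGet? j 1).getD 0) ((PySem.List.pyGet? j 2).getD 0) rows cols])

def rectangleOptimized (operations : List (List Int)) : List Bool :=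
  rectLoopA operations [] [] []

-- ===== PORT B =====
-- B's single pass; mins = None or (min of stored first dims, min of stored second dims)
def rectLoopB : List (List Int) → Option (Int × Int) → List Bool → List Bool
  | [], _, ret => ret
  | op :: rest, mins, ret =>
    if (PySem.List.pyGet? op 0).getD 0 = 0 then
      match mins with
      | none => rectLoopB rest (some ((PySem.List.pyGet? op 1).getD 0, (PySem.List.pyGet? op 2).getD 0)) ret
      | some (mr, mc) =>
        rectLoopB rest (some (min mr ((PySem.List.pyGet? op 1).getD 0), min mc ((PySem.List.pyGet? op 2).getD 0))) ret
    else
      match mins with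
      | none => ret ++ [true]   -- append True and break
      | some (mr, mc) =>
        let j1 := (PySem.List.pyGet? op 1).getD 0
        let j2 := (PySem.List.pyGet? op 2).getD 0
        let lo := if j1 ≤ j2 then j1 else j2
        let hi := if j1 ≤ j2 then j2 else j1
        rectLoopB rest mins (ret ++ [decide (lo ≤ min mr mc ∧ hi ≤ max mr mc)])

def rectangleOptimized_alt (operations : List (List Int)) : List Bool :=
  rectLoopB operations none []

-- ===== PRECONDITION & SPEC =====
-- Pre_ admits: no operations; a first operation with a nonzero tag (A answers True and stops,
-- touching nothing else); or all sublists of length ≥ 3. It excludes inputs with a sublist of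
-- fewer than 3 elements reached after a stored rectangle: there A raises IndexError, except that a
-- length-2 query whose first dimension exceeds every stored dimension slips through a
-- short-circuit `and` and A returns False — B's algorithm itself raises IndexError there.
def Pre_rectangleOptimized (operations : List (List Int)) : Prop :=
  operations ≠ [] →
    (operations.headI ≠ [] ∧
      (operations.headI.headI ≠ 0 ∨ ∀ op ∈ operations, 3 ≤ op.length))
instance (operations : List (List Int)) : Decidable (Pre_rectangleOptimized operations) := by
  unfold Pre_rectangleOptimized; infer_instance

def pvWitness_rectangleOptimized : List (List Int) := [[0, 2, 3], [1, 1, 1], [0, 1, 5], [1, 4, 4]]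

def Spec_rectangleOptimized (operations : List (List Int)) (out : List Bool) : Prop := out = rectangleOptimized_alt operations
instance (operations : List (List Int)) (out : List Bool) : Decidable (Spec_rectangleOptimized operations out) := by unfold Spec_rectangleOptimized; infer_instance

-- ===== CLAIM (what is proved, stated in full; the proofs are below) =====
def Claim_equal_rectangleOptimized : Prop := ∀ (operations : List (List Int)), Dom_rectangleOptimized operations → Pre_rectangleOptimized operations → Spec_rectangleOptimized operations (rectangleOptimized operations)

-- ===== LEMMAS AND PROOFS =====

-- the invariant tying A's sorted lists to B's running minima
def rectInv (rows cols : List Int) (mins : Option (Int × Int)) : Prop :=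
  rows.Pairwise (· ≤ ·) ∧ cols.Pairwise (· ≤ ·) ∧ rows.length = cols.length ∧
  (match mins with
   | none => rows = [] ∧ cols = []
   | some (mr, mc) => rows.head? = some mr ∧ cols.head? = some mc)

lemma foldl_if_false (p : Int → Prop) [DecidablePred p] (l : List Int) :
    l.foldl (fun acc k => if p k then acc else false) false = false := by
  induction l with
  | nil => rfl
  | cons a t ih => simp only [List.foldl_cons]; split <;> exact ih

lemma foldl_if_all (p : Int → Prop) [DecidablePred p] (l : List Int) :
    l.foldl (fun acc k => if p k then acc else false) true = l.all (fun k => decide (p k)) := by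
  induction l with
  | nil => rfl
  | cons a t ih =>
    rw [List.foldl_cons, List.all_cons]
    by_cases h : p a
    · rw [if_pos h, ih]; simp [h]
    · rw [if_neg h, foldl_if_false]; simp [h]

lemma head_of_sorted_append (l : List Int) (x m : Int) (hp : l.Pairwise (· ≤ ·))
    (hh : l.head? = some m) :
    (PySem.List.sorted (l ++ [x]) (fun y => y) false).head? = some (min m x) := by
  cases l with
  | nil => simp at hh
  | cons hd l' =>
    rw [List.head?_cons, Option.some_inj] at hh
    subst hh
    have hperm := PySem.List.sorted_perm (hd :: l' ++ [x]) (fun y : Int => y) false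
    have hne : PySem.List.sorted (hd :: l' ++ [x]) (fun y : Int => y) false ≠ [] := by
      rw [Ne, PySem.List.sorted_eq_nil_iff]; simp
    obtain ⟨h, t, hs⟩ := List.exists_cons_of_ne_nil hne
    have hle : ∀ y ∈ hd :: l' ++ [x], h ≤ y :=
      PySem.List.key_head_sorted_le (hd :: l' ++ [x]) (fun y : Int => y) hs
    have hmem : h ∈ hd :: l' ++ [x] := (hperm.mem_iff).mp (by rw [hs]; exact List.mem_cons_self ..)
    have hml : ∀ y ∈ (hd :: l' : List Int), hd ≤ y := by
      intro y hy
      rcases List.mem_cons.mp hy with rfl | hy'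
      · exact le_refl _
      · exact (List.pairwise_cons.mp hp).1 y hy'
    have h1 : h ≤ min hd x := le_min (hle hd (by simp)) (hle x (by simp))
    have h2 : min hd x ≤ h := by
      rcases List.mem_cons.mp hmem with rfl | hin
      · exact min_le_left _ _
      · rcases List.mem_append.mp hin with hin' | hin'
        · exact le_trans (min_le_left _ _) (hml h (List.mem_cons_of_mem _ hin'))
        · simp at hin'; subst hin'; exact min_le_right _ _
    rw [hs]; simp [le_antisymm h1 h2]

lemma head_le_getElem (l : List Int) (m : Int) (hp : l.Pairwise (· ≤ ·))
    (hh : l.head? = some m) : ∀ (i : Nat) (_ : i < l.length), m ≤ l[i] := by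
  intro i h
  cases l with
  | nil => simp at hh
  | cons a t =>
    rw [List.head?_cons, Option.some_inj] at hh
    subst hh
    cases i with
    | zero => simp
    | succ n =>
      rw [List.getElem_cons_succ]
      exact (List.pairwise_cons.mp hp).1 _ (List.getElem_mem _)

lemma rectQueryA_eq (j1 j2 mr mc : Int) (rows cols : List Int)
    (hrp : rows.Pairwise (· ≤ ·)) (hcp : cols.Pairwise (· ≤ ·))
    (hlen : rows.length = cols.length)
    (hr : rows.head? = some mr) (hc : cols.head? = some mc) :
    rectQueryA j1 j2 rows cols = decide (min j1 j2 ≤ min mr mc ∧ max j1 j2 ≤ max mr mc) := by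
  have hn : 0 < rows.length := by
    cases rows with
    | nil => simp at hr
    | cons a t => simp
  rw [Bool.eq_iff_iff]
  unfold rectQueryA
  rw [foldl_if_all (fun k =>
      (j1 ≤ (PySem.List.pyGet? rows k).getD 0 ∧ j2 ≤ (PySem.List.pyGet? cols k).getD 0)
      ∨ (j1 ≤ (PySem.List.pyGet? cols k).getD 0 ∧ j2 ≤ (PySem.List.pyGet? rows k).getD 0))]
  simp only [List.all_eq_true, decide_eq_true_eq]
  have er : (PySem.List.pyGet? rows 0).getD 0 = mr := by
    rw [PySem.List.pyGet?_zero, ← List.head?_eq_getElem?, hr]; rfl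
  have ec : (PySem.List.pyGet? cols 0).getD 0 = mc := by
    rw [PySem.List.pyGet?_zero, ← List.head?_eq_getElem?, hc]; rfl
  constructor
  · intro hall
    have h0 : (0 : Int) ∈ PySem.List.pyRange 0 (rows.length : Int) 1 :=
      PySem.List.mem_pyRange_one.mpr ⟨le_refl _, by exact_mod_cast hn⟩
    have hq := hall 0 h0
    rw [er, ec] at hq
    omega
  · intro hminmax k hk
    obtain ⟨hk0, hk1⟩ := PySem.List.mem_pyRange_one.mp hk
    have hk2 : k < (cols.length : Int) := by rw [← hlen]; exact hk1
    rw [PySem.List.pyGet?_eq_some_getElem rows hk0 hk1,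
        PySem.List.pyGet?_eq_some_getElem cols hk0 hk2]
    simp only [Option.getD_some]
    have h1 := head_le_getElem rows mr hrp hr k.toNat (by omega)
    have h2 := head_le_getElem cols mc hcp hc k.toNat (by omega)
    omega

lemma rectLoop_eq : ∀ (ops : List (List Int)) (rows cols : List Int)
    (mins : Option (Int × Int)) (ret : List Bool),
    (∀ op ∈ ops, 3 ≤ op.length) → rectInv rows cols mins →
    rectLoopA ops rows cols ret = rectLoopB ops mins ret := by
  intro ops
  induction ops with
  | nil => intro rows cols mins ret _ _; rfl
  | cons j rest ih =>
    intro rows cols mins ret hpre hinv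
    obtain ⟨hrp, hcp, hlen, hmatch⟩ := hinv
    have hj : 3 ≤ j.length := hpre j (List.mem_cons_self ..)
    have hpre' : ∀ op ∈ rest, 3 ≤ op.length := fun op hop => hpre op (List.mem_cons_of_mem _ hop)
    rcases j with _ | ⟨a, _ | ⟨b, _ | ⟨c, t⟩⟩⟩
    · simp at hj
    · simp at hj
    · simp at hj
    have e0 : (PySem.List.pyGet? (a :: b :: c :: t) 0).getD 0 = a := by
      rw [show (0:Int) = ((0:Nat):Int) by norm_num, PySem.List.pyGet?_natCast]; simp
    have e1 : (PySem.List.pyGet? (a :: b :: c :: t) 1).getD 0 = b := by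
      rw [show (1:Int) = ((1:Nat):Int) by norm_num, PySem.List.pyGet?_natCast]; simp
    have e2 : (PySem.List.pyGet? (a :: b :: c :: t) 2).getD 0 = c := by
      rw [show (2:Int) = ((2:Nat):Int) by norm_num, PySem.List.pyGet?_natCast]; simp
    simp only [rectLoopA, rectLoopB, e0, e1, e2]
    by_cases ha : a = 0
    · simp only [if_pos ha]
      cases mins with
      | none =>
        obtain ⟨hre, hce⟩ := hmatch
        subst hre; subst hce
        have hb : PySem.List.sorted ([] ++ [b] : List Int) (fun x => x) false = [b] :=
          PySem.List.sorted_eq_self_of_pairwise _ _ (by simp)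
        have hcℓ : PySem.List.sorted ([] ++ [c] : List Int) (fun x => x) false = [c] :=
          PySem.List.sorted_eq_self_of_pairwise _ _ (by simp)
        rw [hb, hcℓ]
        exact ih _ _ _ _ hpre' ⟨by simp, by simp, rfl, rfl, rfl⟩
      | some p =>
        obtain ⟨mr, mc⟩ := p
        obtain ⟨hhr, hhc⟩ := hmatch
        apply ih _ _ _ _ hpre'
        refine ⟨PySem.List.sorted_pairwise _ _, PySem.List.sorted_pairwise _ _, ?_, ?_, ?_⟩
        · rw [PySem.List.length_sorted, PySem.List.length_sorted]
          simp [hlen]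
        · exact head_of_sorted_append rows b mr hrp hhr
        · exact head_of_sorted_append cols c mc hcp hhc
    · simp only [if_neg ha]
      cases mins with
      | none =>
        obtain ⟨hre, hce⟩ := hmatch
        subst hre
        simp
      | some p =>
        obtain ⟨mr, mc⟩ := p
        obtain ⟨hhr, hhc⟩ := hmatch
        have hne : rows.length ≠ 0 := by
          cases rows with
          | nil => simp at hhr
          | cons x xs => simp
        rw [if_neg hne]
        rw [rectQueryA_eq b c mr mc rows cols hrp hcp hlen hhr hhc, min_def, max_def]
        exact ih _ _ _ _ hpre' ⟨hrp, hcp, hlen, hhr, hhc⟩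

-- ===== VERDICT (by name: the statement is the Claim_ definition above) =====
theorem rectangleOptimized_spec : Claim_equal_rectangleOptimized := by
  intro ops _ hpre
  unfold Spec_rectangleOptimized rectangleOptimized rectangleOptimized_alt
  cases ops with
  | nil => rfl
  | cons h t =>
    obtain ⟨hh, hcase⟩ := hpre (by simp)
    rcases hcase with hq | hall
    · -- first operation is a query: both programs answer True and stop
      rcases h with _ | ⟨x, h'⟩
      · exact absurd rfl hh
      have e0 : (PySem.List.pyGet? (x :: h') 0).getD 0 = x := by
        rw [PySem.List.pyGet?_zero_cons]; rfl
      rw [List.headI_cons, List.headI_cons] at hq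
      simp only [rectLoopA, rectLoopB, e0, if_neg hq]
      rfl
    · have hinv : rectInv [] [] none := ⟨List.Pairwise.nil, List.Pairwise.nil, rfl, rfl, rfl⟩
      exact rectLoop_eq (h :: t) [] [] none [] hall hinv
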